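-- pv_equiv track=rewrite | github.com/Samreay/Samreay | builder/convert.py | remove_dumb_shit
-- ===== SOURCE A (Python) =====
-- def remove_dumb_shit(lines: list[str]) -> list[str]:
--     remove = ["texmanager", "DeprecationWarnin", "InteractiveShellApp", "dedent function was deprecated"]
--     results = []
--     for l in lines:
--         for r in remove:
--             if r in l:
--                 break
--         else:
--             results.append(l)
--     return results
-- ===== SOURCE B (Python) =====
-- def remove_dumb_shit(lines: list[str]) -> list[str]:
--     remove = ["texmanager", "DeprecationWarnin", "InteractiveShellApp", "dedent function was deprecated"]
--
--     def has_banned(line: str) -> bool: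
--         # simulate all partial pattern matches in one left-to-right pass over the line
--         states = []  # (pattern, number of chars already matched)
--         for c in line:
--             new_states = []
--             for r, j in states + [(r, 0) for r in remove]:
--                 if r[j] == c:
--                     if j + 1 == len(r):
--                         return True
--                     new_states.append((r, j + 1))
--             states = new_states
--         return False
--
--     return [l for l in lines if not has_banned(l)]
-- ===== Notes on version B (the rewrite author's own statement) =====
-- stated objective: alternative
-- what changed: A tests each blacklist pattern against the whole line with 'in' (re-scanning the line per pattern, for/else with break); B makes a single left-to-right pass over each line, maintaining the set of live partial pattern matches (an NFA-style multi-pattern scan) and filters the lines that never complete a match.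
import Mathlib
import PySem

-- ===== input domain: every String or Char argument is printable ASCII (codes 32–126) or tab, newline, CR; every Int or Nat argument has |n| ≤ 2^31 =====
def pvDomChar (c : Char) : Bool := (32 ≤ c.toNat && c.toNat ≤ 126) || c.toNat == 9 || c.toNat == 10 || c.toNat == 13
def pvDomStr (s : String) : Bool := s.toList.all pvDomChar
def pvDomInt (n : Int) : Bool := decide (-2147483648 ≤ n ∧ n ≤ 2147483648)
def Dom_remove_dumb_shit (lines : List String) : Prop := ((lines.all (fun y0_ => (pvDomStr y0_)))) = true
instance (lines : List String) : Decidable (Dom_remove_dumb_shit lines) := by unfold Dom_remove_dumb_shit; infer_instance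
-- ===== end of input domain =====

-- ===== PORT A =====
-- B replaces A's per-pattern 'in' tests with a single left-to-right pass per line that
-- advances all partial pattern matches at once (alternative, same asymptotic cost).
def pvRemoveA : List String :=
  ["texmanager", "DeprecationWarnin", "InteractiveShellApp", "dedent function was deprecated"]

-- for l in lines: for r in remove: if r in l: break / else: results.append(l)
def remove_dumb_shit (lines : List String) : List String :=
  lines.foldl (fun results l =>
    if pvRemoveA.any (fun r => PySem.Str.isIn r l) then results else results ++ [l]) []

-- ===== PORT B =====
def pvRemoveB : List (List Char) :=
  ["texmanager".toList, "DeprecationWarnin".toList, "InteractiveShellApp".toList,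
   "dedent function was deprecated".toList]

-- [(r, 0) for r in remove]
def pvSeeds : List (List Char × Nat) := pvRemoveB.map (fun r => (r, 0))

-- the inner 'for r, j in states + seeds' loop of has_banned; 'none' = the early 'return True'.
-- Python's r[j] is ported as 'r[j]? = some c' (exact: every state reached has j < len r).
def pvStep (c : Char) : List (List Char × Nat) → Option (List (List Char × Nat))
  | [] => some []
  | (r, j) :: rest =>
    if r[j]? = some c then
      if j + 1 = r.length then none
      else (pvStep c rest).map (fun ns => (r, j + 1) :: ns)
    else pvStep c rest

-- the 'for c in line' loop of has_banned
def pvScan : List (List Char × Nat) → List Char → Bool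
  | _, [] => false
  | states, c :: cs =>
    match pvStep c (states ++ pvSeeds) with
    | none => true
    | some ns => pvScan ns cs

def pvHasBanned (l : String) : Bool := pvScan [] l.toList

def remove_dumb_shit_alt (lines : List String) : List String :=
  lines.filter (fun l => !pvHasBanned l)

-- ===== PRECONDITION & SPEC =====
def Spec_remove_dumb_shit (lines : List String) (out : List String) : Prop := out = remove_dumb_shit_alt lines
instance (lines : List String) (out : List String) : Decidable (Spec_remove_dumb_shit lines out) := by unfold Spec_remove_dumb_shit; infer_instance

-- ===== CLAIM (what is proved, stated in full; the proofs are below) =====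
def Claim_equal_remove_dumb_shit : Prop := ∀ (lines : List String), Dom_remove_dumb_shit lines → Spec_remove_dumb_shit lines (remove_dumb_shit lines)

-- ===== LEMMAS AND PROOFS =====

-- state invariant: every tracked state is a live partial match ending at the processed prefix p
def pvStOk (p : List Char) (sts : List (List Char × Nat)) : Prop :=
  ∀ x ∈ sts, x.1 ∈ pvRemoveB ∧ 0 < x.2 ∧ x.2 < x.1.length ∧ x.1.take x.2 <:+ p

-- completeness: every live partial match is tracked
def pvStFull (p : List Char) (sts : List (List Char × Nat)) : Prop :=
  ∀ r ∈ pvRemoveB, ∀ j, 0 < j → j < r.length → r.take j <:+ p → (r, j) ∈ sts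

-- no pattern occurs in the processed prefix yet
def pvNoHit (p : List Char) : Prop := ∀ r ∈ pvRemoveB, ¬ r <:+: p

lemma pv_concat_suffix_concat {as bs : List Char} {a b : Char} :
    as ++ [a] <:+ bs ++ [b] ↔ a = b ∧ as <:+ bs := by
  rw [← List.reverse_prefix]
  simp [List.cons_prefix_cons]

lemma pv_take_succ_suffix {r p : List Char} {c : Char} {j : Nat} (hj : j < r.length) :
    r.take (j + 1) <:+ p ++ [c] ↔ r[j]? = some c ∧ r.take j <:+ p := by
  rw [List.take_succ_eq_append_getElem hj, pv_concat_suffix_concat,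
    List.getElem?_eq_getElem hj]
  simp [eq_comm]

lemma pv_infix_concat {r p : List Char} {c : Char} :
    r <:+: p ++ [c] ↔ r <:+: p ∨ r <:+ p ++ [c] := by
  constructor
  · rintro ⟨s, t, h⟩
    rcases List.eq_nil_or_concat t with rfl | ⟨t', x, rfl⟩
    · right; exact ⟨s, by simpa using h⟩
    · left
      have h2 : (s ++ r ++ t') ++ [x] = p ++ [c] := by simpa using h
      exact ⟨s, t', (List.append_inj' h2 rfl).1⟩
  · rintro (h | h)
    · exact h.trans (List.prefix_append p [c]).isInfix
    · exact h.isInfix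

lemma pvStep_none_iff (c : Char) (sts : List (List Char × Nat)) :
    pvStep c sts = none ↔ ∃ x ∈ sts, x.1[x.2]? = some c ∧ x.2 + 1 = x.1.length := by
  induction sts with
  | nil => simp [pvStep]
  | cons x rest ih =>
    obtain ⟨r, j⟩ := x
    simp only [pvStep]
    split_ifs with h1 h2
    · simp [h1, h2]
    · rw [Option.map_eq_none_iff, ih]
      constructor
      · rintro ⟨x, hx, hc, hl⟩
        exact ⟨x, List.mem_cons_of_mem _ hx, hc, hl⟩
      · rintro ⟨x, hx, hc, hl⟩
        rcases List.mem_cons.mp hx with rfl | hx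
        · exact absurd hl h2
        · exact ⟨x, hx, hc, hl⟩
    · rw [ih]
      constructor
      · rintro ⟨x, hx, hc, hl⟩
        exact ⟨x, List.mem_cons_of_mem _ hx, hc, hl⟩
      · rintro ⟨x, hx, hc, hl⟩
        rcases List.mem_cons.mp hx with rfl | hx
        · exact absurd hc h1
        · exact ⟨x, hx, hc, hl⟩

lemma pvStep_some_mem (c : Char) (sts ns : List (List Char × Nat))
    (h : pvStep c sts = some ns) (y : List Char × Nat) :
    y ∈ ns ↔ ∃ x ∈ sts, x.1[x.2]? = some c ∧ x.2 + 1 ≠ x.1.length ∧ y = (x.1, x.2 + 1) := by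
  induction sts generalizing ns with
  | nil =>
    simp only [pvStep, Option.some_inj] at h
    subst h; simp
  | cons x rest ih =>
    obtain ⟨r, j⟩ := x
    simp only [pvStep] at h
    split_ifs at h with h1 h2
    · rw [Option.map_eq_some_iff] at h
      obtain ⟨ms, hrec, hns⟩ := h
      subst hns
      rw [List.mem_cons, ih ms hrec]
      constructor
      · rintro (rfl | ⟨x, hx, hc, hne, rfl⟩)
        · exact ⟨(r, j), by simp, h1, h2, rfl⟩
        · exact ⟨x, List.mem_cons_of_mem _ hx, hc, hne, rfl⟩
      · rintro ⟨x, hx, hc, hne, rfl⟩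
        rcases List.mem_cons.mp hx with rfl | hx
        · left; rfl
        · right; exact ⟨x, hx, hc, hne, rfl⟩
    · rw [ih ns h]
      constructor
      · rintro ⟨x, hx, hc, hne, rfl⟩
        exact ⟨x, List.mem_cons_of_mem _ hx, hc, hne, rfl⟩
      · rintro ⟨x, hx, hc, hne, rfl⟩
        rcases List.mem_cons.mp hx with rfl | hx
        · exact absurd hc h1
        · exact ⟨x, hx, hc, hne, rfl⟩

lemma pv_nonempty : ∀ r ∈ pvRemoveB, r ≠ [] := by decide

lemma pvScan_correct : ∀ (cs p : List Char) (sts : List (List Char × Nat)),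
    pvStOk p sts → pvStFull p sts → pvNoHit p →
    (pvScan sts cs = true ↔ ∃ r ∈ pvRemoveB, r <:+: p ++ cs) := by
  intro cs
  induction cs with
  | nil =>
    intro p sts hok hfull hno
    simp only [pvScan, List.append_nil]
    constructor
    · intro h; cases h
    · rintro ⟨r, hr, hinf⟩; exact absurd hinf (hno r hr)
  | cons c cs ih =>
    intro p sts hok hfull hno
    have hps : p ++ c :: cs = (p ++ [c]) ++ cs := by simp
    rcases hstep : pvStep c (sts ++ pvSeeds) with _ | ns
    · simp only [pvScan, hstep, true_iff]
      obtain ⟨x, hx, hc, hl⟩ := (pvStep_none_iff c _).mp hstep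
      have hmem : x.1 ∈ pvRemoveB ∧ x.1.take x.2 <:+ p := by
        rcases List.mem_append.mp hx with hx | hx
        · obtain ⟨h1, _, _, h4⟩ := hok x hx; exact ⟨h1, h4⟩
        · obtain ⟨r, hr, rfl⟩ := List.mem_map.mp hx; exact ⟨hr, by simp⟩
      obtain ⟨hlen, -⟩ := List.getElem?_eq_some_iff.mp hc
      have hsuf : x.1.take (x.2 + 1) <:+ p ++ [c] :=
        (pv_take_succ_suffix hlen).mpr ⟨hc, hmem.2⟩
      rw [hl, List.take_length] at hsuf
      refine ⟨x.1, hmem.1, ?_⟩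
      rw [hps]
      exact hsuf.isInfix.trans (List.prefix_append _ _).isInfix
    · simp only [pvScan, hstep]
      have hnone : ∀ x ∈ sts ++ pvSeeds, ¬(x.1[x.2]? = some c ∧ x.2 + 1 = x.1.length) := by
        intro x hx hcon
        have h0 : pvStep c (sts ++ pvSeeds) = none :=
          (pvStep_none_iff c _).mpr ⟨x, hx, hcon.1, hcon.2⟩
        rw [hstep] at h0; cases h0
      have hno' : pvNoHit (p ++ [c]) := by
        intro r hr hinf
        rcases pv_infix_concat.mp hinf with hinf | hsuf
        · exact hno r hr hinf
        · have hrlen : 0 < r.length := List.length_pos_iff.mpr (pv_nonempty r hr)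
          have htake : r.take (r.length - 1 + 1) <:+ p ++ [c] := by
            rw [Nat.sub_add_cancel hrlen, List.take_length]; exact hsuf
          obtain ⟨hc', hp'⟩ := (pv_take_succ_suffix (by omega)).mp htake
          by_cases hj : r.length - 1 = 0
          · exact hnone (r, 0)
              (List.mem_append_right _ (List.mem_map.mpr ⟨r, hr, rfl⟩))
              ⟨by simpa [hj] using hc', by simp; omega⟩
          · exact hnone (r, r.length - 1)
              (List.mem_append_left _ (hfull r hr (r.length - 1) (by omega) (by omega) hp'))
              ⟨hc', by simp; omega⟩
      have hok' : pvStOk (p ++ [c]) ns := by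
        intro y hy
        obtain ⟨x, hx, hc', hne, rfl⟩ := (pvStep_some_mem c _ ns hstep y).mp hy
        obtain ⟨hxlen, -⟩ := List.getElem?_eq_some_iff.mp hc'
        have hbase : x.1 ∈ pvRemoveB ∧ x.1.take x.2 <:+ p := by
          rcases List.mem_append.mp hx with hx | hx
          · obtain ⟨h1, _, _, h4⟩ := hok x hx; exact ⟨h1, h4⟩
          · obtain ⟨r, hr, rfl⟩ := List.mem_map.mp hx; exact ⟨hr, by simp⟩
        exact ⟨hbase.1, Nat.succ_pos _, by simp; omega,
          (pv_take_succ_suffix hxlen).mpr ⟨hc', hbase.2⟩⟩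
      have hfull' : pvStFull (p ++ [c]) ns := by
        intro r hr j hj0 hjlen hsuf
        obtain ⟨j', rfl⟩ : ∃ j', j = j' + 1 := ⟨j - 1, by omega⟩
        obtain ⟨hc', hp'⟩ := (pv_take_succ_suffix (by omega)).mp hsuf
        have hx : (r, j') ∈ sts ++ pvSeeds := by
          by_cases hj' : j' = 0
          · subst hj'
            exact List.mem_append_right _ (List.mem_map.mpr ⟨r, hr, rfl⟩)
          · exact List.mem_append_left _ (hfull r hr j' (by omega) (by omega) hp')
        exact (pvStep_some_mem c _ ns hstep (r, j' + 1)).mpr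
          ⟨(r, j'), hx, hc', by simp; omega, rfl⟩
      rw [hps]
      exact ih (p ++ [c]) ns hok' hfull' hno' 

lemma pvHasBanned_iff (l : String) :
    pvHasBanned l = true ↔ ∃ r ∈ pvRemoveB, r <:+: l.toList := by
  have h := pvScan_correct l.toList [] []
    (by intro x hx; cases hx)
    (by
      intro r hr j hj0 hjlen hsuf
      exfalso
      have h0 : r.take j = [] := List.suffix_nil.mp hsuf
      rw [List.take_eq_nil_iff] at h0
      rcases h0 with h0 | h0
      · omega
      · exact pv_nonempty r hr h0)
    (by
      intro r hr hinf
      exact pv_nonempty r hr (List.infix_nil.mp hinf))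
  simpa [pvHasBanned] using h

lemma pvHasBanned_eq_any (l : String) :
    pvHasBanned l = pvRemoveA.any (fun r => PySem.Str.isIn r l) := by
  have hBA : pvRemoveB = pvRemoveA.map String.toList := by decide
  rw [Bool.eq_iff_iff, pvHasBanned_iff]
  simp only [List.any_eq_true, PySem.Str.isIn_iff_infix]
  constructor
  · rintro ⟨r, hr, hinf⟩
    rw [hBA] at hr
    obtain ⟨s, hs, rfl⟩ := List.mem_map.mp hr
    exact ⟨s, hs, hinf⟩
  · rintro ⟨s, hs, hinf⟩
    exact ⟨s.toList, by rw [hBA]; exact List.mem_map.mpr ⟨s, hs, rfl⟩, hinf⟩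

lemma pvFoldl_eq_filter (lines acc : List String) :
    lines.foldl (fun results l =>
      if pvRemoveA.any (fun r => PySem.Str.isIn r l) then results else results ++ [l]) acc
    = acc ++ lines.filter (fun l => !pvHasBanned l) := by
  induction lines generalizing acc with
  | nil => simp
  | cons x t ih =>
    rw [List.foldl_cons, List.filter_cons, ← pvHasBanned_eq_any, ih]
    cases pvHasBanned x <;> simp

-- ===== VERDICT (by name: the statement is the Claim_ definition above) =====
theorem remove_dumb_shit_spec : Claim_equal_remove_dumb_shit := by
  intro lines _
  show remove_dumb_shit lines = remove_dumb_shit_alt lines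
  unfold remove_dumb_shit remove_dumb_shit_alt
  simpa using pvFoldl_eq_filter lines []
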